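-- pv_equiv track=rewrite | github.com/pantanvita/wis-python-2025 | day02/protein-mz-tool-cmdline.py | digest_trypsin
-- ===== SOURCE A (Python) =====
-- def digest_trypsin(sequence):
--     """Trypsin cleaves after K or R (except when followed by P)."""
--     peptides, current = [], ""
--     for i, aa in enumerate(sequence):
--         current += aa
--         if aa in ['K', 'R'] and not (i + 1 < len(sequence) and sequence[i + 1] == 'P'):
--             peptides.append(current)
--             current = ""
--     if current:
--         peptides.append(current)
--     return peptides
-- ===== SOURCE B (Python) =====
-- def digest_trypsin(sequence):
--     """Trypsin cleaves after K or R (except when followed by P)."""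
--     n = len(sequence)
--     cuts = [i + 1 for i in range(n)
--             if sequence[i] in 'KR'
--             and not (i + 1 < n and sequence[i + 1] == 'P')]
--     bounds = [0] + cuts + [n]
--     return [sequence[a:b] for a, b in zip(bounds, bounds[1:]) if a < b]
-- ===== Notes on version B (the rewrite author's own statement) =====
-- stated objective: alternative
-- what changed: Replaced A's single pass with a mutable current-peptide accumulator by a two-phase decomposition: first collect the cut indices after K/R (not before P), then slice the sequence between consecutive boundaries.
import Mathlib
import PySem

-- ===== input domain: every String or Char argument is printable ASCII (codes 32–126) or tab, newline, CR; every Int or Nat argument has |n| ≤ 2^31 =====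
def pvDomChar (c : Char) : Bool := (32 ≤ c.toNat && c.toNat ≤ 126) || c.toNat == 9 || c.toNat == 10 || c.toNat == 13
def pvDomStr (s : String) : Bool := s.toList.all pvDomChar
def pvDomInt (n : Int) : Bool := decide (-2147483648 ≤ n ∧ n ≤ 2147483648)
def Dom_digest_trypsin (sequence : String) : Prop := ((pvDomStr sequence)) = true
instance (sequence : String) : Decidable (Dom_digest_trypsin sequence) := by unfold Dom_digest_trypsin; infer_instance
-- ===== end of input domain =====

-- B replaces A's single accumulator loop by two phases — collect cut indices, then slice
-- the string between consecutive boundaries (objective: alternative decomposition, same cost).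

-- ===== PORT A =====
def digest_trypsin (sequence : String) : List String :=
  let l := sequence.toList
  let st := (PySem.List.enumerate l).foldl
    (fun (st : List String × List Char) (p : Int × Char) =>
      let cur := st.2 ++ [p.2]
      if (p.2 == 'K' || p.2 == 'R') &&
         !(decide (p.1 + 1 < (l.length : Int)) && (PySem.List.pyGet? l (p.1 + 1) == some 'P'))
      then (st.1 ++ [String.ofList cur], ([] : List Char))
      else (st.1, cur)) ([], [])
  if st.2 = [] then st.1 else st.1 ++ [String.ofList st.2]

-- ===== PORT B =====
def digest_trypsin_alt (sequence : String) : List String :=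
  let l := sequence.toList
  let n := l.length
  let cuts := ((List.range n).filter (fun i : Nat =>
      (PySem.List.pyGet? l (i : Int) == some 'K' || PySem.List.pyGet? l (i : Int) == some 'R') &&
      !(decide (i + 1 < n) && (PySem.List.pyGet? l ((i : Int) + 1) == some 'P')))).map (fun i => i + 1)
  let bounds : List Nat := 0 :: (cuts ++ [n])
  ((bounds.zip bounds.tail).filter (fun p => decide (p.1 < p.2))).map
    (fun p => String.ofList (PySem.List.slice l (some (p.1 : Int)) (some (p.2 : Int))))

-- ===== PRECONDITION & SPEC =====
def Spec_digest_trypsin (sequence : String) (out : List String) : Prop := out = digest_trypsin_alt sequence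
instance (sequence : String) (out : List String) : Decidable (Spec_digest_trypsin sequence out) := by unfold Spec_digest_trypsin; infer_instance

-- ===== CLAIM (what is proved, stated in full; the proofs are below) =====
def Claim_equal_digest_trypsin : Prop := ∀ (sequence : String), Dom_digest_trypsin sequence → Spec_digest_trypsin sequence (digest_trypsin sequence)

-- ===== LEMMAS AND PROOFS =====

def pvCond (l : List Char) (k : Nat) : Bool :=
  (l[k]? == some 'K' || l[k]? == some 'R') &&
  !(decide (k + 1 < l.length) && (l[k + 1]? == some 'P'))

def pvSpans (l : List Char) : List (Int × Char) → List Char → List String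
  | [], cur => if cur = [] then [] else [String.ofList cur]
  | p :: ps, cur =>
    if (p.2 == 'K' || p.2 == 'R') &&
       !(decide (p.1 + 1 < (l.length : Int)) && (PySem.List.pyGet? l (p.1 + 1) == some 'P'))
    then String.ofList (cur ++ [p.2]) :: pvSpans l ps []
    else pvSpans l ps (cur ++ [p.2])

def pvSeg (l : List Char) (a b : Nat) : String := String.ofList ((l.drop a).take (b - a))

def pvSpanList (l : List Char) : Nat → List Nat → List String
  | a, [] => if a < l.length then [pvSeg l a l.length] else []
  | a, c :: cs => (if a < c then [pvSeg l a c] else []) ++ pvSpanList l c cs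

def pvCuts (l : List Char) (k m : Nat) : List Nat :=
  ((List.range' k m).filter (pvCond l)).map (· + 1)

-- A's fold with finalization computes pvSpans
theorem pv_fold_spans (l : List Char) (ps : List (Int × Char)) (peps : List String) (cur : List Char) :
    (let st := ps.foldl
      (fun (st : List String × List Char) (p : Int × Char) =>
        let cur := st.2 ++ [p.2]
        if (p.2 == 'K' || p.2 == 'R') &&
           !(decide (p.1 + 1 < (l.length : Int)) && (PySem.List.pyGet? l (p.1 + 1) == some 'P'))
        then (st.1 ++ [String.ofList cur], ([] : List Char))
        else (st.1, cur)) (peps, cur);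
     if st.2 = [] then st.1 else st.1 ++ [String.ofList st.2]) = peps ++ pvSpans l ps cur := by
  induction ps generalizing peps cur with
  | nil =>
    simp only [List.foldl_nil, pvSpans]
    split <;> simp_all
  | cons p ps ih =>
    simp only [List.foldl_cons, pvSpans]
    split
    · rw [ih]; simp
    · rw [ih]

-- B's zip/filter/map over boundaries computes pvSpanList
theorem pv_zip_spanList (l : List Char) (cs : List Nat) (a : Nat) :
    ((((a :: (cs ++ [l.length])).zip (cs ++ [l.length])).filter
        (fun p => decide (p.1 < p.2))).map
      (fun p => String.ofList (PySem.List.slice l (some (p.1 : Int)) (some (p.2 : Int))))) =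
    pvSpanList l a cs := by
  induction cs generalizing a with
  | nil =>
    simp only [List.nil_append, List.zip_cons_cons, pvSpanList]
    by_cases h : a < l.length <;>
      simp [h, PySem.List.slice_natCast, pvSeg]
  | cons c cs ih =>
    simp only [List.cons_append, List.zip_cons_cons, pvSpanList, List.filter_cons]
    by_cases h : a < c <;>
      simp [h, PySem.List.slice_natCast, pvSeg, ← ih c]

theorem pv_cond_bridge (l : List Char) (k : Nat) (h : k < l.length) :
    ((l[k] == 'K' || l[k] == 'R') &&
       !(decide ((k : Int) + 1 < (l.length : Int)) && (PySem.List.pyGet? l ((k : Int) + 1) == some 'P')))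
    = pvCond l k := by
  have hc : ((k : Int) + 1) = (((k + 1 : Nat) : Int)) := by push_cast; ring
  have hlt : decide ((k : Int) + 1 < (l.length : Int)) = decide (k + 1 < l.length) := by
    rw [decide_eq_decide]; omega
  rw [pvCond, hc, PySem.List.pyGet?_natCast, ← hc, List.getElem?_eq_getElem h, hlt]
  simp

-- main induction: spans of the suffix from k equal spanList over the cuts in [k, k+m)
theorem pv_main (l : List Char) (m : Nat) : ∀ k a, a ≤ k → k + m = l.length →
    pvSpans l (PySem.List.enumerate (l.drop k) (k : Int)) ((l.drop a).take (k - a)) =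
    pvSpanList l a (pvCuts l k m) := by
  induction m with
  | zero =>
    intro k a ha hk
    simp only [Nat.add_zero] at hk
    subst hk
    simp only [List.drop_length, PySem.List.enumerate_nil, pvSpans, pvCuts, List.range',
      List.filter_nil, List.map_nil, pvSpanList]
    by_cases h : a < l.length
    · have hne : (l.drop a).take (l.length - a) ≠ [] := by
        have : (l.drop a).length = l.length - a := List.length_drop ..
        intro hcon
        have := congrArg List.length hcon
        simp [this] at *
        omega
      simp [h, hne, pvSeg]
    · have hal : a = l.length := by omega
      subst hal
      simp
  | succ m ih =>
    intro k a ha hk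
    have hkl : k < l.length := by omega
    have hdrop : l.drop k = l[k] :: l.drop (k + 1) := List.drop_eq_getElem_cons hkl
    rw [hdrop, PySem.List.enumerate_cons]
    have hcast : ((k : Int) + 1) = (((k + 1 : Nat) : Int)) := by push_cast; ring
    rw [hcast]
    simp only [pvSpans]
    have hcur : (l.drop a).take (k - a) ++ [l[k]] = (l.drop a).take (k + 1 - a) := by
      have h1 : k - a < (l.drop a).length := by
        rw [List.length_drop]; omega
      have h2 : (l.drop a)[k - a] = l[k] := by
        rw [List.getElem_drop]
        congr 1
        omega
      rw [show k + 1 - a = (k - a) + 1 by omega, List.take_add_one,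
        List.getElem?_eq_getElem h1, h2]
      rfl
    have hcuts : pvCuts l k (m + 1) =
        (if pvCond l k then [k + 1] else []) ++ pvCuts l (k + 1) m := by
      simp only [pvCuts, List.range'_succ, List.filter_cons]
      split <;> simp
    rw [pv_cond_bridge l k hkl]
    by_cases hc : pvCond l k
    · rw [if_pos hc, hcur]
      have h0 : ([] : List Char) = (l.drop (k + 1)).take ((k + 1) - (k + 1)) := by simp
      rw [h0, ih (k + 1) (k + 1) (le_refl _) (by omega)]
      rw [hcuts, if_pos hc]
      simp only [List.cons_append, List.nil_append, pvSpanList]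
      rw [if_pos (by omega : a < k + 1)]
      simp [pvSeg]
    · rw [if_neg hc, hcur, ih (k + 1) a (by omega) (by omega)]
      rw [hcuts, if_neg hc, List.nil_append]

theorem pv_A_eq (s : String) :
    digest_trypsin s = pvSpanList s.toList 0 (pvCuts s.toList 0 s.toList.length) := by
  unfold digest_trypsin
  rw [pv_fold_spans s.toList (PySem.List.enumerate s.toList) [] []]
  have := pv_main s.toList s.toList.length 0 0 (le_refl 0) (by omega)
  simpa using this

theorem pv_alt_eq (s : String) :
    digest_trypsin_alt s = pvSpanList s.toList 0 (pvCuts s.toList 0 s.toList.length) := by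
  have hcuts : (((List.range s.toList.length).filter (fun i : Nat =>
      (PySem.List.pyGet? s.toList (i : Int) == some 'K' || PySem.List.pyGet? s.toList (i : Int) == some 'R') &&
      !(decide (i + 1 < s.toList.length) && (PySem.List.pyGet? s.toList ((i : Int) + 1) == some 'P')))).map (fun i => i + 1)) = pvCuts s.toList 0 s.toList.length := by
    rw [pvCuts, List.range_eq_range']
    congr 1
    apply List.filter_congr
    intro i _
    have hc : ((i : Int) + 1) = (((i + 1 : Nat) : Int)) := by push_cast; ring
    rw [hc]
    simp only [PySem.List.pyGet?_natCast, pvCond]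
  show (((((0 : Nat) :: ((((List.range s.toList.length).filter (fun i : Nat =>
      (PySem.List.pyGet? s.toList (i : Int) == some 'K' || PySem.List.pyGet? s.toList (i : Int) == some 'R') &&
      !(decide (i + 1 < s.toList.length) && (PySem.List.pyGet? s.toList ((i : Int) + 1) == some 'P')))).map (fun i => i + 1)) ++ [s.toList.length])).zip ((0 : Nat) :: ((((List.range s.toList.length).filter (fun i : Nat =>
      (PySem.List.pyGet? s.toList (i : Int) == some 'K' || PySem.List.pyGet? s.toList (i : Int) == some 'R') &&
      !(decide (i + 1 < s.toList.length) && (PySem.List.pyGet? s.toList ((i : Int) + 1) == some 'P')))).map (fun i => i + 1)) ++ [s.toList.length])).tail).filter (fun p => decide (p.1 < p.2))).map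
      (fun p => String.ofList (PySem.List.slice s.toList (some (p.1 : Int)) (some (p.2 : Int))))) =
    pvSpanList s.toList 0 (pvCuts s.toList 0 s.toList.length)
  rw [hcuts, List.tail_cons, pv_zip_spanList]

-- ===== VERDICT (by name: the statement is the Claim_ definition above) =====
theorem digest_trypsin_spec : Claim_equal_digest_trypsin := by
  intro s _
  unfold Spec_digest_trypsin
  rw [pv_A_eq, pv_alt_eq]
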